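-- pv_equiv track=rewrite | github.com/bits-sharad/mera | apps/api/src/orchestrator/graph.py | _infer_route
-- ===== SOURCE A (Python) =====
-- from typing import Any
--
-- def _infer_route(
--     task: str,
--     query: str,
--     project_id: str | None = None,
--     job_ids: list[str] | None = None,
-- ) -> dict[str, Any]:
--     """Infer the primary task from explicit task param or keyword matching.
--
--     Args:
--         task: Explicit task parameter
--         query: User query string
--         project_id: Project ID from context
--         job_ids: List of job IDs from context
--
--     Returns:
--         dict with 'task' and 'reason' keys
--     """
--     task = (task or "auto").lower()
--     if task != "auto":
--         return {"task": task, "reason": "explicit_task_param"}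
--
--     q = query.lower()
--
--     # Check for ingest operations
--     if any(
--         k in q for k in ["ingest", "merge workbook", "populate vector", "import mercer"]
--     ):
--         return {"task": "ingest_mercer", "reason": "keyword"}
--
--     # Check for grading operations
--     if any(k in q for k in ["grade", "grading", "ipe", "points"]):
--         return {"task": "grading", "reason": "keyword"}
--
--     # Check for matching operations
--     if any(
--         k in q for k in ["match", "matching", "similar role", "closest role", "catalog"]
--     ):
--         return {"task": "matching", "reason": "keyword"}
--
--     # Check for job description operations
--     if any(k in q for k in ["job description", "jd", "rewrite", "standardize"]):
--         return {"task": "job_description", "reason": "keyword"}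
--
--     # Infer from context: if project_id or job_ids present, likely matching or grading
--     if project_id or job_ids:
--         if any(k in q for k in ["match", "matching"]):
--             return {"task": "matching", "reason": "context_and_keyword"}
--         elif any(k in q for k in ["grade", "grading"]):
--             return {"task": "grading", "reason": "context_and_keyword"}
--         # Default to matching if context provided but no clear keyword
--         return {"task": "matching", "reason": "context_inference"}
--
--     return {"task": "classification", "reason": "default"}
-- ===== SOURCE B (Python) =====
-- from typing import Any
--
-- # Flat keyword -> priority index (0 = highest). The task for a query is the
-- # highest-priority category any of whose keywords occurs in the query.
-- _KEYWORD_PRIORITY = {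
--     "ingest": 0, "merge workbook": 0, "populate vector": 0, "import mercer": 0,
--     "grade": 1, "grading": 1, "ipe": 1, "points": 1,
--     "match": 2, "matching": 2, "similar role": 2, "closest role": 2, "catalog": 2,
--     "job description": 3, "jd": 3, "rewrite": 3, "standardize": 3,
-- }
-- _TASK_BY_PRIORITY = ["ingest_mercer", "grading", "matching", "job_description"]
--
-- def _infer_route(
--     task: str,
--     query: str,
--     project_id: str | None = None,
--     job_ids: list[str] | None = None,
-- ) -> dict[str, Any]:
--     task = (task or "auto").lower()
--     if task != "auto":
--         return {"task": task, "reason": "explicit_task_param"}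
--     q = query.lower()
--     # Collect the priorities of ALL matching keywords, then select the minimum:
--     # equivalent to A's ordered short-circuit group checks because the table's
--     # priorities follow A's category order.
--     hits = {p for k, p in _KEYWORD_PRIORITY.items() if k in q}
--     if hits:
--         return {"task": _TASK_BY_PRIORITY[min(hits)], "reason": "keyword"}
--     # No keyword matched: in particular neither "match" nor "grade"/"grading"
--     # occurs in q, so A's inner context checks can never fire.
--     if project_id or job_ids:
--         return {"task": "matching", "reason": "context_inference"}
--     return {"task": "classification", "reason": "default"}
-- ===== Notes on version B (the rewrite author's own statement) =====
-- stated objective: alternative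
-- what changed: Instead of A's ordered short-circuit checks per keyword group, B scans one flat keyword->priority table, collects the set of priorities of all matching keywords, and selects the task of minimal priority; the context block's inner match/grade branches are dropped because their keywords are provably already consumed by the keyword stage (dead code).
import Mathlib
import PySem

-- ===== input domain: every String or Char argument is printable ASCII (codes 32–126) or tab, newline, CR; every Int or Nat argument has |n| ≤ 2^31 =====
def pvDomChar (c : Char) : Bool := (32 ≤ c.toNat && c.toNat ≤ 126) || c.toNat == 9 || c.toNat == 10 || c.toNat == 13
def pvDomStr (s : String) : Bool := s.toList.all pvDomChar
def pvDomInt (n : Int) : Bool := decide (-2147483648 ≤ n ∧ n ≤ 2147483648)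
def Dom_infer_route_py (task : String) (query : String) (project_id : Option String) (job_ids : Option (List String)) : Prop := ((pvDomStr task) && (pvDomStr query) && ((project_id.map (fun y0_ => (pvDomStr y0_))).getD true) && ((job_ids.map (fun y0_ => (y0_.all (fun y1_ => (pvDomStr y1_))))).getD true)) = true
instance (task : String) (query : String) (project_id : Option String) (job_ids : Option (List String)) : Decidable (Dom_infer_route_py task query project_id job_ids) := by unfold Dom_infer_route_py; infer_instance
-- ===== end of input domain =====

-- B replaces A's ordered short-circuit keyword-group checks by a min-priority selection over
-- all matches in one flat keyword->priority table, and drops the context block's provably dead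
-- inner match/grade branches (objective: alternative; same asymptotic cost).


-- ===== PORT A =====
-- truthiness of an optional string / optional list ('if project_id or job_ids')
def pvTruthyStr (o : Option String) : Bool := match o with | none => false | some s => !(s == "")
def pvTruthyList (o : Option (List String)) : Bool := match o with | none => false | some l => !(l.isEmpty)

def infer_route_py (task : String) (query : String) (project_id : Option String) (job_ids : Option (List String)) : List (String × String) :=
  let task := PySem.Str.lower (if task == "" then "auto" else task)
  if task != "auto" then [("task", task), ("reason", "explicit_task_param")]
  else
    let q := PySem.Str.lower query
    if ["ingest", "merge workbook", "populate vector", "import mercer"].any (fun k => PySem.Str.isIn k q) then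
      [("task", "ingest_mercer"), ("reason", "keyword")]
    else if ["grade", "grading", "ipe", "points"].any (fun k => PySem.Str.isIn k q) then
      [("task", "grading"), ("reason", "keyword")]
    else if ["match", "matching", "similar role", "closest role", "catalog"].any (fun k => PySem.Str.isIn k q) then
      [("task", "matching"), ("reason", "keyword")]
    else if ["job description", "jd", "rewrite", "standardize"].any (fun k => PySem.Str.isIn k q) then
      [("task", "job_description"), ("reason", "keyword")]
    else if pvTruthyStr project_id || pvTruthyList job_ids then
      if ["match", "matching"].any (fun k => PySem.Str.isIn k q) then
        [("task", "matching"), ("reason", "context_and_keyword")]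
      else if ["grade", "grading"].any (fun k => PySem.Str.isIn k q) then
        [("task", "grading"), ("reason", "context_and_keyword")]
      else [("task", "matching"), ("reason", "context_inference")]
    else [("task", "classification"), ("reason", "default")]

-- ===== PORT B =====
-- Source B's _KEYWORD_PRIORITY dict as its (insertion-ordered) item list; priorities are Nat tags
-- (all are the literals 0..3, nonnegative, so list indexing below is plain getD — exact here).
def pvKwPriority : List (String × Nat) :=
  [("ingest", 0), ("merge workbook", 0), ("populate vector", 0), ("import mercer", 0),
   ("grade", 1), ("grading", 1), ("ipe", 1), ("points", 1),
   ("match", 2), ("matching", 2), ("similar role", 2), ("closest role", 2), ("catalog", 2),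
   ("job description", 3), ("jd", 3), ("rewrite", 3), ("standardize", 3)]
def pvTaskByPriority : List String := ["ingest_mercer", "grading", "matching", "job_description"]

def infer_route_py_alt (task : String) (query : String) (project_id : Option String) (job_ids : Option (List String)) : List (String × String) :=
  let task := PySem.Str.lower (if task == "" then "auto" else task)
  if task != "auto" then [("task", task), ("reason", "explicit_task_param")]
  else
    let q := PySem.Str.lower query
    -- hits = {p for k, p in _KEYWORD_PRIORITY.items() if k in q}
    let hits : PySem.Set Nat :=
      PySem.Set.ofList ((pvKwPriority.filter (fun kp => PySem.Str.isIn kp.1 q)).map Prod.snd)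
    -- 'if hits: return _TASK_BY_PRIORITY[min(hits)]' — min over a set, order-independent
    match PySem.List.min? hits (fun x => x) with
    | some m => [("task", pvTaskByPriority.getD m ""), ("reason", "keyword")]
    | none =>
      if pvTruthyStr project_id || pvTruthyList job_ids then
        [("task", "matching"), ("reason", "context_inference")]
      else [("task", "classification"), ("reason", "default")]

-- ===== PRECONDITION & SPEC =====
def Spec_infer_route_py (task : String) (query : String) (project_id : Option String) (job_ids : Option (List String)) (out : List (String × String)) : Prop := out = infer_route_py_alt task query project_id job_ids
instance (task : String) (query : String) (project_id : Option String) (job_ids : Option (List String)) (out : List (String × String)) : Decidable (Spec_infer_route_py task query project_id job_ids out) := by unfold Spec_infer_route_py; infer_instance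

-- ===== CLAIM (what is proved, stated in full; the proofs are below) =====
def Claim_equal_infer_route_py : Prop := ∀ (task : String) (query : String) (project_id : Option String) (job_ids : Option (List String)), Dom_infer_route_py task query project_id job_ids → Spec_infer_route_py task query project_id job_ids (infer_route_py task query project_id job_ids)

-- ===== LEMMAS AND PROOFS =====

-- min of a dedup'd Nat list is the min of the list (a set's min ignores duplicates)
lemma pv_min?_ofList (l : List Nat) :
    PySem.List.min? (PySem.Set.ofList l) (fun x => x) = PySem.List.min? l (fun x => x) := by
  rcases e1 : PySem.List.min? (PySem.Set.ofList l) (fun x => x) with _ | m1 <;>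
    rcases e2 : PySem.List.min? l (fun x => x) with _ | m2
  · rfl
  · have h1 := (PySem.List.min?_eq_none_iff _ _).mp e1
    have h2 := PySem.List.min?_mem e2
    rw [← PySem.Set.mem_ofList] at h2
    simp [h1] at h2
  · have h2 := (PySem.List.min?_eq_none_iff _ _).mp e2
    have h1 := PySem.List.min?_mem e1
    rw [PySem.Set.mem_ofList] at h1
    simp [h2] at h1
  · have hm1 := PySem.List.min?_mem e1
    have hm2 := PySem.List.min?_mem e2
    rw [PySem.Set.mem_ofList] at hm1
    have le1 := PySem.List.min?_isMin e1 m2 (by rw [PySem.Set.mem_ofList]; exact hm2)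
    have le2 := PySem.List.min?_isMin e2 m1 hm1
    simp only [Option.some.injEq]
    omega

lemma pv_foldl_min_eq (n : Nat) (xs : List Nat) (h : ∀ x ∈ xs, n ≤ x) : xs.foldl min n = n := by
  induction xs generalizing n with
  | nil => rfl
  | cons a t ih =>
    simp only [List.foldl_cons]
    rw [min_eq_left (h a (by simp))]
    exact ih n (fun x hx => h x (by simp [hx]))

-- on a priority-monotone table, the min matching priority is the first match's priority
lemma pv_min_filter_mono (l : List (String × Nat)) (p : String × Nat → Bool)
    (hmono : l.Pairwise (fun a b => a.2 ≤ b.2)) :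
    PySem.List.min? ((l.filter p).map Prod.snd) (fun x => x) = (l.find? p).map Prod.snd := by
  induction l with
  | nil => rfl
  | cons a t ih =>
    rcases List.pairwise_cons.mp hmono with ⟨h1, h2⟩
    by_cases hp : p a
    · rw [List.find?_cons_of_pos hp]
      simp only [List.filter_cons, hp, if_pos, List.map_cons]
      rw [PySem.List.min?_id_cons, pv_foldl_min_eq]
      · rfl
      · intro x hx
        rcases List.mem_map.mp hx with ⟨b, hb, rfl⟩
        exact h1 b (List.mem_of_mem_filter hb)
    · rw [List.find?_cons_of_neg (by simp [hp])]
      simp only [List.filter_cons, hp, if_neg, Bool.false_eq_true, not_false_iff]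
      exact ih h2

-- (find? over the concrete table).map snd, written as A's grouped disjunctions
lemma pv_find_table (q : String) :
    ((pvKwPriority.find? (fun kp => PySem.Str.isIn kp.1 q)).map Prod.snd)
    = (if (PySem.Str.isIn "ingest" q || (PySem.Str.isIn "merge workbook" q || (PySem.Str.isIn "populate vector" q || PySem.Str.isIn "import mercer" q))) then some 0
       else if (PySem.Str.isIn "grade" q || (PySem.Str.isIn "grading" q || (PySem.Str.isIn "ipe" q || PySem.Str.isIn "points" q))) then some 1
       else if (PySem.Str.isIn "match" q || (PySem.Str.isIn "matching" q || (PySem.Str.isIn "similar role" q || (PySem.Str.isIn "closest role" q || PySem.Str.isIn "catalog" q)))) then some 2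
       else if (PySem.Str.isIn "job description" q || (PySem.Str.isIn "jd" q || (PySem.Str.isIn "rewrite" q || PySem.Str.isIn "standardize" q))) then some 3
       else none) := by
  simp only [pvKwPriority]
  by_cases h1 : PySem.Str.isIn "ingest" q = true
  · simp_all [List.find?]
  by_cases h2 : PySem.Str.isIn "merge workbook" q = true
  · simp_all [List.find?]
  by_cases h3 : PySem.Str.isIn "populate vector" q = true
  · simp_all [List.find?]
  by_cases h4 : PySem.Str.isIn "import mercer" q = true
  · simp_all [List.find?]
  by_cases h5 : PySem.Str.isIn "grade" q = true
  · simp_all [List.find?]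
  by_cases h6 : PySem.Str.isIn "grading" q = true
  · simp_all [List.find?]
  by_cases h7 : PySem.Str.isIn "ipe" q = true
  · simp_all [List.find?]
  by_cases h8 : PySem.Str.isIn "points" q = true
  · simp_all [List.find?]
  by_cases h9 : PySem.Str.isIn "match" q = true
  · simp_all [List.find?]
  by_cases h10 : PySem.Str.isIn "matching" q = true
  · simp_all [List.find?]
  by_cases h11 : PySem.Str.isIn "similar role" q = true
  · simp_all [List.find?]
  by_cases h12 : PySem.Str.isIn "closest role" q = true
  · simp_all [List.find?]
  by_cases h13 : PySem.Str.isIn "catalog" q = true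
  · simp_all [List.find?]
  by_cases h14 : PySem.Str.isIn "job description" q = true
  · simp_all [List.find?]
  by_cases h15 : PySem.Str.isIn "jd" q = true
  · simp_all [List.find?]
  by_cases h16 : PySem.Str.isIn "rewrite" q = true
  · simp_all [List.find?]
  by_cases h17 : PySem.Str.isIn "standardize" q = true
  · simp_all [List.find?]
  simp_all [List.find?]

-- ===== VERDICT (by name: the statement is the Claim_ definition above) =====
set_option maxHeartbeats 1600000 in
theorem infer_route_py_spec : Claim_equal_infer_route_py := by
  intro task query project_id job_ids _
  unfold Spec_infer_route_py infer_route_py infer_route_py_alt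
  have key : ∀ q : String,
      PySem.List.min? (PySem.Set.ofList
        ((pvKwPriority.filter (fun kp => PySem.Str.isIn kp.1 q)).map Prod.snd)) (fun x => x)
      = (pvKwPriority.find? (fun kp => PySem.Str.isIn kp.1 q)).map Prod.snd :=
    fun q => (pv_min?_ofList _).trans (pv_min_filter_mono _ _ (by decide))
  simp only [key, pv_find_table]
  simp only [List.any_cons, List.any_nil, Bool.or_false]
  split_ifs <;> simp_all [pvTaskByPriority]
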